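-- pv_equiv track=rewrite | github.com/endomorphosis/ipfs_accelerate_py | tests/test/skills/fix_try_except_indentation.py | fix_missing_indentation_after_try
-- ===== SOURCE A (Python) =====
-- def fix_missing_indentation_after_try(content):
--     """Fix cases where there is no indentation after try statements."""
--     # Fix try blocks that have statements with no indentation
--     lines = content.splitlines()
--     fixed_lines = []
--     in_try_block = False
--     try_indent = 0
--
--     for i, line in enumerate(lines):
--         stripped = line.strip()
--
--         # If this is a try statement, remember we're in a try block
--         if stripped == "try:":
--             fixed_lines.append(line)
--             in_try_block = True
--             try_indent = len(line) - len(line.lstrip())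
--             continue
--
--         # If we're in a try block and the line isn't indented properly
--         if in_try_block and stripped and not line.startswith(" " * (try_indent + 4)):
--             # Exclude except/finally/else which end the try block
--             if not any(stripped.startswith(end) for end in ["except", "finally", "else"]):
--                 # Add proper indentation
--                 fixed_lines.append(" " * (try_indent + 4) + stripped)
--                 continue
--             else:
--                 # We've reached the end of the try block
--                 in_try_block = False
--
--         # If we see except/finally/else, we're no longer in the try part
--         if stripped.startswith(("except", "finally", "else:")):
--             in_try_block = False
--
--         # Add the line unchanged
--         fixed_lines.append(line)
--
--     return "\n".join(fixed_lines)
-- ===== SOURCE B (Python) =====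
-- def _step(st, line):
--     """Moore-machine transition: next (in_try, try_indent) state after this line."""
--     in_try, ti = st
--     s = line.strip()
--     if s == "try:":
--         return (True, len(line) - len(line.lstrip()))
--     if in_try and s and not line.startswith(" " * (ti + 4)):
--         if any(s.startswith(e) for e in ("except", "finally", "else")):
--             return (False, ti)
--         return (True, ti)
--     return (False if s.startswith(("except", "finally", "else:")) else in_try, ti)
--
--
-- def _render(st, line):
--     """Moore-machine output: the emitted line for this line under state st."""
--     in_try, ti = st
--     s = line.strip()
--     if s == "try:":
--         return line
--     if in_try and s and not line.startswith(" " * (ti + 4)):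
--         if not any(s.startswith(e) for e in ("except", "finally", "else")):
--             return " " * (ti + 4) + s
--     return line
--
--
-- def fix_missing_indentation_after_try(content):
--     """Fix cases where there is no indentation after try statements."""
--     lines = content.splitlines()
--     # pass 1: materialise the state seen by each line (scan of the transition function)
--     states = []
--     st = (False, 0)
--     for line in lines:
--         states.append(st)
--         st = _step(st, line)
--     # pass 2: render each line from its state
--     return "\n".join(map(_render, states, lines))
-- ===== Notes on version B (the rewrite author's own statement) =====
-- stated objective: alternative
-- what changed: A's single loop that simultaneously mutates state and emits output is factored into a Moore machine run in two staged passes: a scan pass that materialises the (in_try, try_indent) state seen by each line via a pure transition function, then a map over the zipped states and lines via a pure output function.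
import Mathlib
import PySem

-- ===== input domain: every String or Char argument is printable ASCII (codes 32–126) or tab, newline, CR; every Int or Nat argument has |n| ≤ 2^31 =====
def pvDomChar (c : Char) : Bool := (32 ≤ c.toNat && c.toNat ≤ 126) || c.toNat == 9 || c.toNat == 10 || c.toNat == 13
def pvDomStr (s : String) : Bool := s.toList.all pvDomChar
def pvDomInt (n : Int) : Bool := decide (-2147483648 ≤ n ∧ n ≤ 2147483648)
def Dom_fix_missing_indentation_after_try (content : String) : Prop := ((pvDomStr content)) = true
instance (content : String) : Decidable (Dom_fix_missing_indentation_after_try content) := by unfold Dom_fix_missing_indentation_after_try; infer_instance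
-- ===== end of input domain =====

-- B factors A's single loop (which mutates state and emits output together) into a Moore
-- machine run in two staged passes: a scan materialising the per-line state, then a map
-- rendering each line from its state (objective: alternative).

-- shared helpers: these small expressions appear verbatim in both Python versions
-- line.strip()
def pvStrip (l : String) : String := PySem.Str.strip l
-- len(line) - len(line.lstrip())
def pvIndent (l : String) : Nat := (PySem.Str.len l - PySem.Str.len (PySem.Str.lstrip l)).toNat
-- " " * n
def pvPad (n : Nat) : String := String.ofList (List.replicate n ' ')
-- any(s.startswith(end) for end in ["except", "finally", "else"])
def pvEndsTry (s : String) : Bool :=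
  PySem.Str.startswith s "except" || PySem.Str.startswith s "finally" || PySem.Str.startswith s "else"
-- s.startswith(("except", "finally", "else:"))
def pvEndsTry2 (s : String) : Bool :=
  PySem.Str.startswith s "except" || PySem.Str.startswith s "finally" || PySem.Str.startswith s "else:"

-- ===== PORT A =====
-- the for-loop of A, as structural recursion over the lines with state (in_try_block, try_indent)
def fixLoopA : List String → Bool → Nat → List String
  | [], _, _ => []
  | line :: rest, inTry, ti =>
    let stripped := pvStrip line
    if stripped = "try:" then
      line :: fixLoopA rest true (pvIndent line)
    else if inTry && !(stripped == "") && !PySem.Str.startswith line (pvPad (ti + 4)) then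
      if !pvEndsTry stripped then
        (pvPad (ti + 4) ++ stripped) :: fixLoopA rest inTry ti
      else
        -- in_try_block := False; the later "except/finally/else:" check keeps it False
        line :: fixLoopA rest false ti
    else
      line :: fixLoopA rest (if pvEndsTry2 stripped then false else inTry) ti

def fix_missing_indentation_after_try (content : String) : String :=
  PySem.Str.join "\n" (fixLoopA (PySem.Str.splitlines content) false 0)

-- ===== PORT B =====
-- B's _step: pure Moore-machine transition
def stepB (st : Bool × Nat) (line : String) : Bool × Nat :=
  let s := pvStrip line
  if s = "try:" then (true, pvIndent line)
  else if st.1 && !(s == "") && !PySem.Str.startswith line (pvPad (st.2 + 4)) then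
    if pvEndsTry s then (false, st.2) else (true, st.2)
  else (if pvEndsTry2 s then false else st.1, st.2)

-- B's _render: pure Moore-machine output
def renderB (st : Bool × Nat) (line : String) : String :=
  let s := pvStrip line
  if s = "try:" then line
  else if st.1 && !(s == "") && !PySem.Str.startswith line (pvPad (st.2 + 4)) && !pvEndsTry s then
    pvPad (st.2 + 4) ++ s
  else line

-- B's pass 1: the scan producing the state seen by each line
def statesB : Bool × Nat → List String → List (Bool × Nat)
  | _, [] => []
  | st, line :: rest => st :: statesB (stepB st line) rest

def fix_missing_indentation_after_try_alt (content : String) : String :=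
  let lines := PySem.Str.splitlines content
  -- pass 2: map(_render, states, lines)
  PySem.Str.join "\n" ((List.zip (statesB (false, 0) lines) lines).map (fun p => renderB p.1 p.2))

-- ===== PRECONDITION & SPEC =====
def Spec_fix_missing_indentation_after_try (content : String) (out : String) : Prop := out = fix_missing_indentation_after_try_alt content
instance (content : String) (out : String) : Decidable (Spec_fix_missing_indentation_after_try content out) := by unfold Spec_fix_missing_indentation_after_try; infer_instance

-- ===== CLAIM (what is proved, stated in full; the proofs are below) =====
def Claim_equal_fix_missing_indentation_after_try : Prop := ∀ (content : String), Dom_fix_missing_indentation_after_try content → Spec_fix_missing_indentation_after_try content (fix_missing_indentation_after_try content)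

-- ===== LEMMAS AND PROOFS =====

-- A's loop equals the zipped render of B's state scan, for any starting state
theorem fixLoopA_eq_scan (ls : List String) (inTry : Bool) (ti : Nat) :
    fixLoopA ls inTry ti
      = (List.zip (statesB (inTry, ti) ls) ls).map (fun p => renderB p.1 p.2) := by
  induction ls generalizing inTry ti with
  | nil => rfl
  | cons line rest ih =>
    rw [statesB, List.zip_cons_cons, List.map_cons, ← ih]
    simp only [fixLoopA, stepB, renderB]
    split_ifs <;> simp_all

-- ===== VERDICT (by name: the statement is the Claim_ definition above) =====
theorem fix_missing_indentation_after_try_spec : Claim_equal_fix_missing_indentation_after_try := by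
  intro content _
  unfold Spec_fix_missing_indentation_after_try fix_missing_indentation_after_try fix_missing_indentation_after_try_alt
  rw [fixLoopA_eq_scan]
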